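-- pv_equiv track=rewrite | github.com/Fiach-ONeill/Logistic-Regression-FS | app.py | num_coeff
-- ===== SOURCE A (Python) =====
-- def num_coeff(d):
--     t = 0
--     for n in range(d+1):
--         for i in range(n+1):
--             for j in range(n+1):
--                 for k in range(n+1):
--                     if i+j+k==n:
--                         t+=1
--     return t
-- ===== SOURCE B (Python) =====
-- def num_coeff(d):
--     if d < 0:
--         return 0
--     return (d + 1) * (d + 2) * (d + 3) // 6
-- ===== Notes on version B (the rewrite author's own statement) =====
-- stated objective: faster
-- what changed: Replaced the quadruple nested loop counting triples (i,j,k) with i+j+k=n for each n<=d by the closed-form binomial (d+1)(d+2)(d+3)//6 (= C(d+3,3)), returning 0 for negative d.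
import Mathlib
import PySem

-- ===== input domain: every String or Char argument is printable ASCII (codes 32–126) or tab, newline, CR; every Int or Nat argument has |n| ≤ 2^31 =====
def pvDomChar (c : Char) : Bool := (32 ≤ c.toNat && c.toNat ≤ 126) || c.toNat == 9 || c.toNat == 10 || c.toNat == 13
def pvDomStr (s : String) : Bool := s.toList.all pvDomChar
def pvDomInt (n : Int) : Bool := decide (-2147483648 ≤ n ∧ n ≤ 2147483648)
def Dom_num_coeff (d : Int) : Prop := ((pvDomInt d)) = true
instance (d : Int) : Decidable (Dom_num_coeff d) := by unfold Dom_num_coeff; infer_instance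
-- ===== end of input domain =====

-- B replaces A's O(d^4) quadruple loop by the closed form (d+1)(d+2)(d+3)//6 (objective: faster).

-- ===== PORT A =====
-- innermost loop: for k in range(n+1): if i+j+k==n: t+=1
def pvLoopK (n i j t : Int) : Int :=
  (PySem.List.pyRange 0 (n+1) 1).foldl (fun t k => if i + j + k = n then t + 1 else t) t
-- for j in range(n+1): …
def pvLoopJ (n i t : Int) : Int :=
  (PySem.List.pyRange 0 (n+1) 1).foldl (fun t j => pvLoopK n i j t) t
-- for i in range(n+1): …
def pvLoopI (n t : Int) : Int :=
  (PySem.List.pyRange 0 (n+1) 1).foldl (fun t i => pvLoopJ n i t) t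

def num_coeff (d : Int) : Int :=
  (PySem.List.pyRange 0 (d+1) 1).foldl (fun t n => pvLoopI n t) 0

-- ===== PORT B =====
def num_coeff_alt (d : Int) : Int :=
  if d < 0 then 0 else PySem.Int.floordiv ((d + 1) * (d + 2) * (d + 3)) 6

-- ===== PRECONDITION & SPEC =====
def Spec_num_coeff (d : Int) (out : Int) : Prop := out = num_coeff_alt d
instance (d : Int) (out : Int) : Decidable (Spec_num_coeff d out) := by unfold Spec_num_coeff; infer_instance

-- ===== CLAIM (what is proved, stated in full; the proofs are below) =====
def Claim_equal_num_coeff : Prop := ∀ (d : Int), Dom_num_coeff d → Spec_num_coeff d (num_coeff d)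

-- ===== LEMMAS AND PROOFS =====

-- the k-loop over range(m) adds 1 exactly when the unique k with i+j+k=n lies in [0, m)
theorem pvK_aux (m : Nat) (n i j t : Int) :
    (PySem.List.pyRange 0 (m:Int) 1).foldl (fun t k => if i + j + k = n then t + 1 else t) t
      = t + (if 0 ≤ n - i - j ∧ n - i - j < (m:Int) then 1 else 0) := by
  induction m generalizing t with
  | zero => simp [PySem.List.pyRange_one_eq_nil]
  | succ m ih =>
      have h : ((m+1 : Nat) : Int) = (m:Int) + 1 := by push_cast; ring
      rw [h, PySem.List.pyRange_one_succ_right (by positivity), List.foldl_append, ih]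
      simp only [List.foldl_cons, List.foldl_nil]
      split_ifs <;> omega

theorem pvLoopK_eq (n i j t : Int) (hn : 0 ≤ n) :
    pvLoopK n i j t = t + (if 0 ≤ n - i - j ∧ n - i - j ≤ n then 1 else 0) := by
  have h : n + 1 = ((n.toNat + 1 : Nat) : Int) := by omega
  unfold pvLoopK
  rw [h, pvK_aux]
  split_ifs <;> omega

-- the j-loop over range(m): for fixed 0 ≤ i, the indicator fires for 0 ≤ j ≤ n - i
theorem pvJ_aux (m : Nat) (n i t : Int) (hi : 0 ≤ i) (hn : 0 ≤ n) :
    (PySem.List.pyRange 0 (m:Int) 1).foldl (fun t j => pvLoopK n i j t) t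
      = t + max 0 (min (m:Int) (n - i + 1)) := by
  induction m generalizing t with
  | zero => simp [PySem.List.pyRange_one_eq_nil]
  | succ m ih =>
      have h : ((m+1 : Nat) : Int) = (m:Int) + 1 := by push_cast; ring
      rw [h, PySem.List.pyRange_one_succ_right (by positivity), List.foldl_append, ih]
      simp only [List.foldl_cons, List.foldl_nil]
      rw [pvLoopK_eq _ _ _ _ hn]
      split_ifs <;> omega

theorem pvLoopJ_eq (n i t : Int) (h0 : 0 ≤ i) (h1 : i ≤ n) :
    pvLoopJ n i t = t + (n - i + 1) := by
  have h : n + 1 = ((n.toNat + 1 : Nat) : Int) := by omega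
  unfold pvLoopJ
  rw [h, pvJ_aux _ _ _ _ h0 (le_trans h0 h1)]
  omega

-- the i-loop over range(m), m ≤ n+1: doubled sum is m*(2n - m + 3)
theorem pvI_aux (m : Nat) (n t : Int) (hm : (m:Int) ≤ n + 1) :
    2 * ((PySem.List.pyRange 0 (m:Int) 1).foldl (fun t i => pvLoopJ n i t) t)
      = 2 * t + (m:Int) * (2 * n - m + 3) := by
  induction m generalizing t with
  | zero => simp [PySem.List.pyRange_one_eq_nil]
  | succ m ih =>
      have h : ((m+1 : Nat) : Int) = (m:Int) + 1 := by push_cast; ring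
      rw [h] at hm ⊢
      rw [PySem.List.pyRange_one_succ_right (by positivity), List.foldl_append]
      simp only [List.foldl_cons, List.foldl_nil]
      rw [pvLoopJ_eq _ _ _ (by positivity) (by omega)]
      have ihh := ih t (by omega)
      linear_combination ihh

theorem pvLoopI_eq (n t : Int) (hn : 0 ≤ n) :
    2 * pvLoopI n t = 2 * t + (n + 1) * (n + 2) := by
  have h : n + 1 = ((n.toNat + 1 : Nat) : Int) := by omega
  unfold pvLoopI
  rw [h, pvI_aux _ _ _ (by omega)]
  have h2 : ((n.toNat + 1 : Nat) : Int) = n + 1 := by omega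
  rw [h2]; ring

-- the outer n-loop over range(m): six times the sum is m*(m+1)*(m+2)
theorem pvOuter_aux (m : Nat) (t : Int) :
    6 * ((PySem.List.pyRange 0 (m:Int) 1).foldl (fun t n => pvLoopI n t) t)
      = 6 * t + (m:Int) * (m + 1) * (m + 2) := by
  induction m generalizing t with
  | zero => simp [PySem.List.pyRange_one_eq_nil]
  | succ m ih =>
      have h : ((m+1 : Nat) : Int) = (m:Int) + 1 := by push_cast; ring
      rw [h, PySem.List.pyRange_one_succ_right (by positivity), List.foldl_append]
      simp only [List.foldl_cons, List.foldl_nil]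
      have hL := pvLoopI_eq (m:Int)
        ((PySem.List.pyRange 0 (m:Int) 1).foldl (fun t n => pvLoopI n t) t) (by positivity)
      linear_combination 3 * hL + ih t

-- ===== VERDICT (by name: the statement is the Claim_ definition above) =====
theorem num_coeff_spec : Claim_equal_num_coeff := by
  intro d _
  unfold Spec_num_coeff num_coeff num_coeff_alt
  by_cases hd : d < 0
  · rw [PySem.List.pyRange_one_eq_nil (by omega)]
    simp [hd]
  · push Not at hd
    rw [if_neg (by omega), PySem.Int.floordiv_eq_ediv_of_pos (by norm_num)]
    have h6 := pvOuter_aux (d.toNat + 1) 0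
    rw [show ((d.toNat + 1 : Nat) : Int) = d + 1 by omega] at h6
    have h6' : 6 * ((PySem.List.pyRange 0 (d + 1) 1).foldl (fun t n => pvLoopI n t) 0)
        = (d + 1) * (d + 2) * (d + 3) := by rw [h6]; ring
    rw [← h6', Int.mul_ediv_cancel_left _ (by norm_num)]
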